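-- pv_equiv track=rewrite | github.com/SkProGL/bdh | count.py | make_counting_data
-- ===== SOURCE A (Python) =====
-- def make_counting_data(
--     max_number=100,
--     window=10,
--     lines=1000
-- ):
--     data = []
--     for i in range(lines):
--         start = i % (max_number - window)
--         seq = [str(start + j) for j in range(window)]
--         data.append(" ".join(seq))
--     return "\n".join(data)
-- ===== SOURCE B (Python) =====
-- def make_counting_data(
--     max_number=100,
--     window=10,
--     lines=1000
-- ):
--     period = max_number - window
--     # only the starts actually used: i % period < min(period, lines)
--     table = [" ".join(str(s + j) for j in range(window)) for s in range(min(period, lines))]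
--     return "\n".join(table[i % period] for i in range(lines))
-- ===== Notes on version B (the rewrite author's own statement) =====
-- stated objective: alternative
-- what changed: B precomputes the period's distinct line strings once as a table and assembles the output by indexing table[i % period], instead of A's per-line recomputation of start and the whole joined line for every iteration; Pre_ excludes lines > 0 with max_number <= window, where A either raises ZeroDivisionError (equality) or returns accidental negative-modulo lines (max_number < window) on which B's empty table raises IndexError.
-- outside the precondition, e.g. on make_counting_data(3, 5, 2): A returns '0 1 2 3 4\n-1 0 1 2 3', B raises IndexError; on make_counting_data(5, 5, 1): A raises ZeroDivisionError, B raises ZeroDivisionError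
import Mathlib
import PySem

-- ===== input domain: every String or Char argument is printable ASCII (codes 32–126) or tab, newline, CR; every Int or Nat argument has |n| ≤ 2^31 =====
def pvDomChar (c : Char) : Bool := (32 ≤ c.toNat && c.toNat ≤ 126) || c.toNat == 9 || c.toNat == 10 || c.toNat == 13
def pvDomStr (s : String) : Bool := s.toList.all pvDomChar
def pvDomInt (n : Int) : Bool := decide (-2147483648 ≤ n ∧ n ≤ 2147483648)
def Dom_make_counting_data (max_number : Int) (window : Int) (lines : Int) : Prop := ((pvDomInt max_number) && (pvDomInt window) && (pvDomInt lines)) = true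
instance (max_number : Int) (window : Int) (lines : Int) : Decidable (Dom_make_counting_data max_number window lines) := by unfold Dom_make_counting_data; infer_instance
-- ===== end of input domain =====

-- B builds the period's distinct lines once as a table and assembles the output by
-- indexing table[i % period], instead of recomputing every line per index: alternative decomposition.


-- ===== PORT A =====
def make_counting_data (max_number : Int) (window : Int) (lines : Int) : String :=
  let data := (PySem.List.pyRange 0 lines 1).foldl (fun data i =>
    let start := PySem.Int.mod i (max_number - window)
    let seq := (PySem.List.pyRange 0 window 1).map (fun j => PySem.Int.toStr (start + j))
    data ++ [PySem.Str.join " " seq]) ([] : List String)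
  PySem.Str.join "\n" data

-- ===== PORT B =====
def make_counting_data_alt (max_number : Int) (window : Int) (lines : Int) : String :=
  let period := max_number - window
  -- only the starts actually used: range(min(period, lines))
  let table := (PySem.List.pyRange 0 (min period lines) 1).map (fun s =>
    PySem.Str.join " " ((PySem.List.pyRange 0 window 1).map (fun j => PySem.Int.toStr (s + j))))
  -- table[i % period]: in range under Pre_ (total form pyGetD, per convention)
  PySem.Str.join "\n" ((PySem.List.pyRange 0 lines 1).map (fun i =>
    PySem.List.pyGetD table (PySem.Int.mod i period) ""))

-- ===== PRECONDITION & SPEC =====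
-- Pre_ excludes lines > 0 with max_number ≤ window: there A raises ZeroDivisionError
-- (max_number = window) or returns accidental negative-modulo lines (max_number < window),
-- on which B's naturally empty table raises IndexError.
def Pre_make_counting_data (max_number : Int) (window : Int) (lines : Int) : Prop :=
  lines ≤ 0 ∨ window < max_number
instance (max_number : Int) (window : Int) (lines : Int) : Decidable (Pre_make_counting_data max_number window lines) := by unfold Pre_make_counting_data; infer_instance
def pvWitness_make_counting_data : Int × Int × Int := (20, 3, 7)

def Spec_make_counting_data (max_number : Int) (window : Int) (lines : Int) (out : String) : Prop := out = make_counting_data_alt max_number window lines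
instance (max_number : Int) (window : Int) (lines : Int) (out : String) : Decidable (Spec_make_counting_data max_number window lines out) := by unfold Spec_make_counting_data; infer_instance

-- ===== CLAIM (what is proved, stated in full; the proofs are below) =====
def Claim_equal_make_counting_data : Prop := ∀ (max_number : Int) (window : Int) (lines : Int), Dom_make_counting_data max_number window lines → Pre_make_counting_data max_number window lines → Spec_make_counting_data max_number window lines (make_counting_data max_number window lines)

-- ===== LEMMAS AND PROOFS =====

theorem make_counting_data_spec : Claim_equal_make_counting_data := by
  intro max_number window lines _ hpre
  unfold Spec_make_counting_data make_counting_data make_counting_data_alt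
  dsimp only
  by_cases hl : lines ≤ 0
  · rw [PySem.List.pyRange_one_eq_nil hl]
    rfl
  · have hper : 0 < max_number - window := by
      rcases hpre with h | h
      · omega
      · omega
    congr 1
    rw [PySem.List.foldl_append_singleton_eq_map, List.nil_append]
    apply List.map_congr_left
    intro i hi
    rw [PySem.List.mem_pyRange_one] at hi
    have hmle : PySem.Int.mod i (max_number - window) ≤ i := by
      have hi' : i = ((i.toNat : ℕ) : Int) := by omega
      have hp' : max_number - window = (((max_number - window).toNat : ℕ) : Int) := by omega
      rw [hi', hp', PySem.Int.mod_natCast]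
      exact_mod_cast Nat.mod_le _ _
    rw [PySem.List.pyGetD_map_pyRange_of_nonneg _ _ _ _
      (PySem.Int.mod_nonneg i hper)
      (lt_min (PySem.Int.mod_lt i hper) (by omega))]
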